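-- pv_equiv track=rewrite | github.com/snljty/FrogJumpWalk_game | FrogJumpWalk_game.py | GenerateHint
-- ===== SOURCE A (Python) =====
-- def GenerateHint(n: int, reverse: bool = False) -> list:
--     l = list()
--     if reverse:
--         operators = ['-->', '<--', '->', '<-']
--     else:
--         operators = ['<--', '-->', '<-', '->']
--     for i in range(1, n + 1):
--         for j in range(1, i + 1):
--             if j == i:
--                 l.append(operators[2 + i % 2])
--             else:
--                 l.append(operators[i % 2])
--     for j in range(n):
--         l.append(operators[(n + 1) % 2])
--     for i in range(n, 0, -1):
--         for j in range(i, 0, -1):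
--             if j == i:
--                 l.append(operators[2 + i % 2])
--             else:
--                 l.append(operators[i % 2])
--     return l
-- ===== SOURCE B (Python) =====
-- def GenerateHint(n: int, reverse: bool = False) -> list:
--     # The descending triangle is exactly the element-wise reversal of the
--     # ascending one, so only the ascending half is ever built; tokens are
--     # picked by row parity (shifted by `reverse`) from two 2-entry tables,
--     # with no 4-entry operator table and no second nested loop.
--     flip = 1 if reverse else 0
--     long_ = ['<--', '-->']
--     short = ['<-', '->']
--     asc = []
--     for i in range(1, n + 1):
--         p = (i + flip) % 2
--         asc.extend([long_[p]] * (i - 1))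
--         asc.append(short[p])
--     return asc + [long_[(n + 1 + flip) % 2]] * n + asc[::-1]
-- ===== Notes on version B (the rewrite author's own statement) =====
-- stated objective: alternative
-- what changed: B never builds the descending triangle: it exploits the symmetry that the descending half is the element-wise reversal of the ascending half and returns asc + middle + asc[::-1], building the ascending half in one flat loop that selects tokens by row parity (shifted by `reverse`) from two 2-entry tables instead of A's 4-entry operator table and three loops (two nested).
import Mathlib
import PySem

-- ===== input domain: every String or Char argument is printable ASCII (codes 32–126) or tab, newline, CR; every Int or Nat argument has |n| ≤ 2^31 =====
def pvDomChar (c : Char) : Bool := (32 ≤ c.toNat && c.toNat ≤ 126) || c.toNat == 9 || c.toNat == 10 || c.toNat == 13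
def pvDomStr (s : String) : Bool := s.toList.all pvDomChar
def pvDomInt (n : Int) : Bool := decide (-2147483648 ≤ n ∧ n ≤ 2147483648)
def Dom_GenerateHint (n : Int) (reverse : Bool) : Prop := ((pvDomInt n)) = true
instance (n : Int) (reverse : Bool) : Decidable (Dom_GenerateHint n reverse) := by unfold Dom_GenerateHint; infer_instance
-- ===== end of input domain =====

-- B builds only the ascending half (tokens chosen by row parity from two 2-entry tables) and
-- obtains the descending triangle as the element-wise reversal of the ascending half; same values, same cost.

-- ===== PORT A =====
def GenerateHint (n : Int) (reverse : Bool) : List String :=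
  let operators : List String :=
    if reverse then ["-->", "<--", "->", "<-"] else ["<--", "-->", "<-", "->"]
  let l : List String := []
  let l := (PySem.List.pyRange 1 (n + 1) 1).foldl (fun l i =>
    (PySem.List.pyRange 1 (i + 1) 1).foldl (fun l j =>
      if j == i then l ++ [PySem.List.pyGetD operators (2 + PySem.Int.mod i 2) ""]
      else l ++ [PySem.List.pyGetD operators (PySem.Int.mod i 2) ""]) l) l
  let l := (PySem.List.pyRange 0 n 1).foldl (fun l _ =>
    l ++ [PySem.List.pyGetD operators (PySem.Int.mod (n + 1) 2) ""]) l
  let l := (PySem.List.pyRange n 0 (-1)).foldl (fun l i =>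
    (PySem.List.pyRange i 0 (-1)).foldl (fun l j =>
      if j == i then l ++ [PySem.List.pyGetD operators (2 + PySem.Int.mod i 2) ""]
      else l ++ [PySem.List.pyGetD operators (PySem.Int.mod i 2) ""]) l) l
  l

-- ===== PORT B =====
def GenerateHint_alt (n : Int) (reverse : Bool) : List String :=
  let flip : Int := if reverse then 1 else 0
  let long_ : List String := ["<--", "-->"]
  let short : List String := ["<-", "->"]
  let asc : List String := (PySem.List.pyRange 1 (n + 1) 1).foldl (fun asc i =>
    let p := PySem.Int.mod (i + flip) 2
    (asc ++ PySem.List.pyRepeat [PySem.List.pyGetD long_ p ""] (i - 1))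
      ++ [PySem.List.pyGetD short p ""]) []
  -- asc[::-1] is ported as List.reverse (exact: full reverse slice)
  asc ++ PySem.List.pyRepeat [PySem.List.pyGetD long_ (PySem.Int.mod (n + 1 + flip) 2) ""] n
    ++ asc.reverse

-- ===== PRECONDITION & SPEC =====
def Spec_GenerateHint (n : Int) (reverse : Bool) (out : List String) : Prop := out = GenerateHint_alt n reverse
instance (n : Int) (reverse : Bool) (out : List String) : Decidable (Spec_GenerateHint n reverse out) := by unfold Spec_GenerateHint; infer_instance

-- ===== CLAIM (what is proved, stated in full; the proofs are below) =====
def Claim_equal_GenerateHint : Prop := ∀ (n : Int) (reverse : Bool), Dom_GenerateHint n reverse → Spec_GenerateHint n reverse (GenerateHint n reverse)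

-- ===== LEMMAS AND PROOFS =====

-- proof-only abbreviations: A's two operator values in row i, and B's two table lookups
def pvF (ops : List String) (i : Int) : String := PySem.List.pyGetD ops (PySem.Int.mod i 2) ""
def pvG (ops : List String) (i : Int) : String := PySem.List.pyGetD ops (2 + PySem.Int.mod i 2) ""
def pvFB (flip : Int) (i : Int) : String := PySem.List.pyGetD ["<--", "-->"] (PySem.Int.mod (i + flip) 2) ""
def pvGB (flip : Int) (i : Int) : String := PySem.List.pyGetD ["<-", "->"] (PySem.Int.mod (i + flip) 2) ""
def pvSeg (ops : List String) (i : Int) : List String :=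
  List.replicate (i - 1).toNat (pvF ops i) ++ [pvG ops i]
def pvSegB (flip : Int) (i : Int) : List String :=
  List.replicate (i - 1).toNat (pvFB flip i) ++ [pvGB flip i]

theorem pvF_eq_false (i : Int) : pvF ["<--", "-->", "<-", "->"] i = pvFB 0 i := by
  unfold pvF pvFB
  rw [PySem.Int.mod_eq_emod_of_pos (by norm_num : (0:Int) < 2),
    PySem.Int.mod_eq_emod_of_pos (by norm_num : (0:Int) < 2)]
  have h0 : (i + 0) % 2 = i % 2 := by omega
  rw [h0]
  have h : i % 2 = 0 ∨ i % 2 = 1 := by omega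
  rcases h with h | h <;> rw [h] <;> decide

theorem pvF_eq_true (i : Int) : pvF ["-->", "<--", "->", "<-"] i = pvFB 1 i := by
  unfold pvF pvFB
  rw [PySem.Int.mod_eq_emod_of_pos (by norm_num : (0:Int) < 2),
    PySem.Int.mod_eq_emod_of_pos (by norm_num : (0:Int) < 2)]
  have h : i % 2 = 0 ∨ i % 2 = 1 := by omega
  rcases h with h | h
  · have h1 : (i + 1) % 2 = 1 := by omega
    rw [h, h1]; decide
  · have h1 : (i + 1) % 2 = 0 := by omega
    rw [h, h1]; decide

theorem pvG_eq_false (i : Int) : pvG ["<--", "-->", "<-", "->"] i = pvGB 0 i := by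
  unfold pvG pvGB
  rw [PySem.Int.mod_eq_emod_of_pos (by norm_num : (0:Int) < 2),
    PySem.Int.mod_eq_emod_of_pos (by norm_num : (0:Int) < 2)]
  have h0 : (i + 0) % 2 = i % 2 := by omega
  rw [h0]
  have h : i % 2 = 0 ∨ i % 2 = 1 := by omega
  rcases h with h | h <;> rw [h] <;> decide

theorem pvG_eq_true (i : Int) : pvG ["-->", "<--", "->", "<-"] i = pvGB 1 i := by
  unfold pvG pvGB
  rw [PySem.Int.mod_eq_emod_of_pos (by norm_num : (0:Int) < 2),
    PySem.Int.mod_eq_emod_of_pos (by norm_num : (0:Int) < 2)]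
  have h : i % 2 = 0 ∨ i % 2 = 1 := by omega
  rcases h with h | h
  · have h1 : (i + 1) % 2 = 1 := by omega
    rw [h, h1]; decide
  · have h1 : (i + 1) % 2 = 0 := by omega
    rw [h, h1]; decide

theorem pv_inner_asc (ops : List String) (i : Int) (hi : 1 <= i) (l : List String) :
    (PySem.List.pyRange 1 (i + 1) 1).foldl
      (fun l j => if j == i then l ++ [pvG ops i] else l ++ [pvF ops i]) l
    = l ++ pvSeg ops i := by
  have h1 : ∀ (acc : List String), ∀ j ∈ PySem.List.pyRange 1 (i + 1) 1,
      (if j == i then acc ++ [pvG ops i] else acc ++ [pvF ops i])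
      = acc ++ [if j == i then pvG ops i else pvF ops i] := by
    intro acc j _; split <;> rfl
  rw [PySem.List.foldl_congr_mem _ _ _ _ h1, PySem.List.foldl_append_singleton_eq_map]
  congr 1
  rw [PySem.List.pyRange_one_succ_right hi, List.map_append]
  have hmap : (PySem.List.pyRange 1 i 1).map (fun j => if j == i then pvG ops i else pvF ops i)
      = (PySem.List.pyRange 1 i 1).map (fun _ => pvF ops i) := by
    apply List.map_congr_left
    intro j hj
    have hb := PySem.List.mem_pyRange_one.mp hj
    have hne : j ≠ i := by omega
    simp [hne]
  rw [hmap, List.map_const', PySem.List.length_pyRange_one]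
  simp [pvSeg]

theorem pv_inner_desc (ops : List String) (i : Int) (hi : 1 <= i) (l : List String) :
    (PySem.List.pyRange i 0 (-1)).foldl
      (fun l j => if j == i then l ++ [pvG ops i] else l ++ [pvF ops i]) l
    = l ++ (pvSeg ops i).reverse := by
  have h1 : ∀ (acc : List String), ∀ j ∈ PySem.List.pyRange i 0 (-1),
      (if j == i then acc ++ [pvG ops i] else acc ++ [pvF ops i])
      = acc ++ [if j == i then pvG ops i else pvF ops i] := by
    intro acc j _; split <;> rfl
  rw [PySem.List.foldl_congr_mem _ _ _ _ h1, PySem.List.foldl_append_singleton_eq_map]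
  congr 1
  rw [PySem.List.pyRange_neg_one_cons (by omega : (0:Int) < i), List.map_cons]
  have hmap : (PySem.List.pyRange (i - 1) 0 (-1)).map (fun j => if j == i then pvG ops i else pvF ops i)
      = (PySem.List.pyRange (i - 1) 0 (-1)).map (fun _ => pvF ops i) := by
    apply List.map_congr_left
    intro j hj
    have hb := PySem.List.mem_pyRange_neg_one.mp hj
    have hne : j ≠ i := by omega
    simp [hne]
  rw [hmap, List.map_const', PySem.List.length_pyRange_neg_one]
  simp [pvSeg, List.reverse_replicate]

theorem pv_main (ops : List String) (flip n : Int)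
    (hF : ∀ i, pvF ops i = pvFB flip i) (hG : ∀ i, pvG ops i = pvGB flip i) :
    (PySem.List.pyRange n 0 (-1)).foldl
      (fun l i => (PySem.List.pyRange i 0 (-1)).foldl
        (fun l j => if j == i then l ++ [pvG ops i] else l ++ [pvF ops i]) l)
      ((PySem.List.pyRange 0 n 1).foldl
        (fun l _ => l ++ [pvF ops (n + 1)])
        ((PySem.List.pyRange 1 (n + 1) 1).foldl
          (fun l i => (PySem.List.pyRange 1 (i + 1) 1).foldl
            (fun l j => if j == i then l ++ [pvG ops i] else l ++ [pvF ops i]) l) []))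
    = (PySem.List.pyRange 1 (n + 1) 1).foldl (fun asc i =>
        (asc ++ PySem.List.pyRepeat [pvFB flip i] (i - 1)) ++ [pvGB flip i]) []
      ++ PySem.List.pyRepeat [pvFB flip (n + 1)] n
      ++ ((PySem.List.pyRange 1 (n + 1) 1).foldl (fun asc i =>
        (asc ++ PySem.List.pyRepeat [pvFB flip i] (i - 1)) ++ [pvGB flip i]) []).reverse := by
  have hascA : (PySem.List.pyRange 1 (n + 1) 1).foldl
      (fun l i => (PySem.List.pyRange 1 (i + 1) 1).foldl
        (fun l j => if j == i then l ++ [pvG ops i] else l ++ [pvF ops i]) l) ([] : List String)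
      = (PySem.List.pyRange 1 (n + 1) 1).flatMap (pvSeg ops) := by
    have h : ∀ (acc : List String), ∀ i ∈ PySem.List.pyRange 1 (n + 1) 1,
        ((PySem.List.pyRange 1 (i + 1) 1).foldl
          (fun l j => if j == i then l ++ [pvG ops i] else l ++ [pvF ops i]) acc)
        = acc ++ pvSeg ops i := by
      intro acc i hi
      exact pv_inner_asc ops i (PySem.List.mem_pyRange_one.mp hi).1 acc
    rw [PySem.List.foldl_congr_mem _ _ _ _ h, PySem.List.foldl_append_eq_flatMap]
    simp
  have hmid : ∀ (l : List String), (PySem.List.pyRange 0 n 1).foldl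
      (fun l _ => l ++ [pvF ops (n + 1)]) l
      = l ++ List.replicate n.toNat (pvF ops (n + 1)) := by
    intro l
    rw [PySem.List.foldl_append_singleton_eq_map (fun _ => pvF ops (n + 1)),
      List.map_const', PySem.List.length_pyRange_one]
    norm_num
  have hdesc : ∀ (l : List String), (PySem.List.pyRange n 0 (-1)).foldl
      (fun l i => (PySem.List.pyRange i 0 (-1)).foldl
        (fun l j => if j == i then l ++ [pvG ops i] else l ++ [pvF ops i]) l) l
      = l ++ ((PySem.List.pyRange 1 (n + 1) 1).flatMap (pvSeg ops)).reverse := by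
    intro l
    have h : ∀ (acc : List String), ∀ i ∈ PySem.List.pyRange n 0 (-1),
        ((PySem.List.pyRange i 0 (-1)).foldl
          (fun l j => if j == i then l ++ [pvG ops i] else l ++ [pvF ops i]) acc)
        = acc ++ (pvSeg ops i).reverse := by
      intro acc i hi
      have hb := PySem.List.mem_pyRange_neg_one.mp hi
      exact pv_inner_desc ops i (by omega) acc
    rw [PySem.List.foldl_congr_mem _ _ _ _ h,
      PySem.List.foldl_append_eq_flatMap (fun i => (pvSeg ops i).reverse)]
    congr 1
    rw [PySem.List.pyRange_neg_one_eq_reverse n 0]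
    norm_num
    rw [List.reverse_flatMap]
    simp [Function.comp_def]
  have hascB : (PySem.List.pyRange 1 (n + 1) 1).foldl (fun asc i =>
      (asc ++ PySem.List.pyRepeat [pvFB flip i] (i - 1)) ++ [pvGB flip i]) ([] : List String)
      = (PySem.List.pyRange 1 (n + 1) 1).flatMap (pvSegB flip) := by
    have h : ∀ (acc : List String), ∀ i ∈ PySem.List.pyRange 1 (n + 1) 1,
        ((acc ++ PySem.List.pyRepeat [pvFB flip i] (i - 1)) ++ [pvGB flip i])
        = acc ++ pvSegB flip i := by
      intro acc i _
      rw [PySem.List.pyRepeat_singleton, List.append_assoc]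
      rfl
    rw [PySem.List.foldl_congr_mem _ _ _ _ h, PySem.List.foldl_append_eq_flatMap (pvSegB flip)]
    simp
  have hsegs : pvSeg ops = pvSegB flip := by
    funext i
    rw [pvSeg, pvSegB, hF, hG]
  rw [hmid, hdesc, hascA, hascB, hsegs, hF, PySem.List.pyRepeat_singleton]

-- ===== VERDICT (by name: the statement is the Claim_ definition above) =====
theorem GenerateHint_spec : Claim_equal_GenerateHint := by
  intro n reverse _
  unfold Spec_GenerateHint GenerateHint GenerateHint_alt
  cases reverse
  · exact pv_main ["<--", "-->", "<-", "->"] 0 n pvF_eq_false pvG_eq_false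
  · exact pv_main ["-->", "<--", "->", "<-"] 1 n pvF_eq_true pvG_eq_true
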